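-- pv_equiv track=rewrite | github.com/study-Algoringo/swjungle_PS | sangsu/PGS_178871.py | solution
-- ===== SOURCE A (Python) =====
-- def solution(players, callings):
--     answer = []
--     for calling in callings:
--         for i, player in enumerate(players):
--             if player == calling:
--                 front_player = players[i-1]
--                 back_player = players[i]
--                 players[i-1] = back_player
--                 players[i] = front_player
--                 break
--
--     answer = players
--
--     return answer
-- ===== SOURCE B (Python) =====
-- def solution(players, callings):
--     # O(len(players)+len(callings)): keep a name->position map and swap in O(1) per calling.
--     # A's negative-index wrap makes the race circular (calling the front player swaps the
--     # front and last runners); the position map uses the same circular predecessor (i-1) % n.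
--     # Mutates players in place, like the original.
--     n = len(players)
--     pos = {p: i for i, p in enumerate(players)}
--     for c in callings:
--         i = pos.get(c)
--         if i is not None:
--             j = (i - 1) % n
--             front = players[j]
--             players[j] = c
--             players[i] = front
--             pos[c] = j
--             pos[front] = i
--     return players
-- ===== Notes on version B (the rewrite author's own statement) =====
-- stated objective: faster
-- what changed: Replaces the per-calling linear scan of players with a name-to-position dict maintained across callings, so each overtake is an O(1) lookup-and-swap instead of an O(n) scan.
-- outside the precondition, e.g. on solution(['a', 'b', 'a'], ['a']): A returns ['a', 'b', 'a'], B returns ['a', 'a', 'b']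
import Mathlib
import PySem

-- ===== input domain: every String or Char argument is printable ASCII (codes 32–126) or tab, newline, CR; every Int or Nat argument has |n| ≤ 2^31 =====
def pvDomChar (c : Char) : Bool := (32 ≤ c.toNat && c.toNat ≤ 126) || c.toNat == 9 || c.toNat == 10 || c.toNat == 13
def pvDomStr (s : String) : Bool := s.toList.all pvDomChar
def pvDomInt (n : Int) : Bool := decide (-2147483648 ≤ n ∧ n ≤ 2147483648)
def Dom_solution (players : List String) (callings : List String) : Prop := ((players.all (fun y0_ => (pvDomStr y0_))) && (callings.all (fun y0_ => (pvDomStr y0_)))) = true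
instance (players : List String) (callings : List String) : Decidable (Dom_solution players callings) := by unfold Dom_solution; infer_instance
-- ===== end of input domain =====

-- B replaces A's per-calling linear scan with a name→position map maintained across callings
-- (objective: faster, O(c+n) instead of O(c·n)); both A and B mutate `players` in place in
-- Python — the equivalence proved here is about the return value. A's negative-index wrap
-- (players[-1]) makes calling the front runner swap the front and last positions; B realises
-- the same circular predecessor as (i-1) % n.

-- ===== PORT A =====
-- inner 'for i, player in enumerate(players): … break': first match swaps positions i-1 and i
-- (indices i and i-1 are always in range for Python — i comes from enumerate, i-1 = -1 wraps —
-- so the total pySetD/pyGetD forms are exact here)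
def pvAInner (ps : List String) (calling : String) : List (Int × String) → List String
  | [] => ps
  | (i, player) :: rest =>
    if player == calling then
      let front := PySem.List.pyGetD ps (i - 1) ""
      let back := PySem.List.pyGetD ps i ""
      PySem.List.pySetD (PySem.List.pySetD ps (i - 1) back) i front
    else pvAInner ps calling rest

def solution (players : List String) (callings : List String) : List String :=
  callings.foldl (fun ps calling => pvAInner ps calling (PySem.List.enumerate ps 0)) players

-- ===== PORT B =====
-- one calling: look the name up in the position dict, swap it with its circular predecessor
def pvBStep (n : Int) (st : List String × PySem.Dict String Int) (c : String) :
    List String × PySem.Dict String Int :=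
  match st.2.get? c with
  | none => st
  | some i =>
    let j := PySem.Int.mod (i - 1) n
    let front := PySem.List.pyGetD st.1 j ""
    let ps := PySem.List.pySetD (PySem.List.pySetD st.1 j c) i front
    (ps, (st.2.insert c j).insert front i)

def solution_alt (players : List String) (callings : List String) : List String :=
  let n : Int := (players.length : Int)
  let pos := (PySem.List.enumerate players 0).foldl
    (fun d (p : Int × String) => d.insert p.2 p.1) (PySem.Dict.empty : PySem.Dict String Int)
  (callings.foldl (pvBStep n) (players, pos)).1

-- ===== PRECONDITION & SPEC =====
-- Pre_ excludes lists with duplicate player names, on which A's first-occurrence scan and a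
-- dict keyed by name (which keeps the last occurrence) are both accidental choices.
def Pre_solution (players : List String) (callings : List String) : Prop := players.Nodup
instance (players : List String) (callings : List String) : Decidable (Pre_solution players callings) := by unfold Pre_solution; infer_instance

def pvWitness_solution : List String × List String := (["mumu", "soe", "poe"], ["soe", "soe"])

def Spec_solution (players : List String) (callings : List String) (out : List String) : Prop := out = solution_alt players callings
instance (players : List String) (callings : List String) (out : List String) : Decidable (Spec_solution players callings out) := by unfold Spec_solution; infer_instance

-- ===== CLAIM (what is proved, stated in full; the proofs are below) =====
def Claim_equal_solution : Prop := ∀ (players : List String) (callings : List String), Dom_solution players callings → Pre_solution players callings → Spec_solution players callings (solution players callings)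

-- ===== LEMMAS AND PROOFS =====

-- first index of a name in the current standings
def pvPosOf (ps : List String) (s : String) : Option Nat := ps.findIdx? (fun p => p == s)

-- Python index (k-1), wrapped: position swapped with position k
def pvSwapIdx (n k : Nat) : Nat := if k = 0 then n - 1 else k - 1

-- the mathematical effect of one calling on the standings
def pvStep (ps : List String) (c : String) : List String :=
  match pvPosOf ps c with
  | none => ps
  | some k => (ps.set (pvSwapIdx ps.length k) c).set k (ps.getD (pvSwapIdx ps.length k) "")

-- invariant tying B's dict to the current standings
def pvInv (ps : List String) (pos : PySem.Dict String Int) : Prop :=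
  ps.Nodup ∧ ∀ s : String, pos.get? s = (pvPosOf ps s).map (fun k => (k : Int))

lemma pvPosOf_some {ps : List String} {s : String} {k : Nat} (h : pvPosOf ps s = some k) :
    ∃ hk : k < ps.length, ps[k] = s := by
  rcases List.findIdx?_eq_some_iff_getElem.mp h with ⟨hlt, hp, -⟩
  exact ⟨hlt, by simpa using hp⟩

lemma pvPosOf_none {ps : List String} {s : String} : pvPosOf ps s = none ↔ s ∉ ps := by
  unfold pvPosOf
  rw [List.findIdx?_eq_none_iff]
  constructor
  · intro h hs
    simpa using h s hs
  · intro h x hx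
    simp only [beq_eq_false_iff_ne, ne_eq]
    rintro rfl
    exact h hx

lemma pvPosOf_of_getElem {ps : List String} (hnd : ps.Nodup) {k : Nat} (hk : k < ps.length)
    (h : ps[k] = s) : pvPosOf ps s = some k := by
  cases hp : pvPosOf ps s with
  | none =>
    exact absurd (h ▸ List.getElem_mem hk) (pvPosOf_none.mp hp)
  | some m =>
    obtain ⟨hm, hms⟩ := pvPosOf_some hp
    have : m = k := (hnd.getElem_inj_iff).mp (hms.trans h.symm)
    rw [this]


lemma pvAInner_eq_find (ps : List String) (c : String) (pairs : List (Int × String)) :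
    pvAInner ps c pairs =
      match pairs.find? (fun p => p.2 == c) with
      | none => ps
      | some q => PySem.List.pySetD (PySem.List.pySetD ps (q.1 - 1) (PySem.List.pyGetD ps q.1 ""))
          q.1 (PySem.List.pyGetD ps (q.1 - 1) "") := by
  induction pairs with
  | nil => simp [pvAInner]
  | cons q rest ih =>
    obtain ⟨i, p⟩ := q
    by_cases hp : (p == c) = true
    · simp [pvAInner, hp]
    · simp [pvAInner, hp, ih]

lemma pvFind_enumerate (c : String) (ps : List String) (s : Int) :
    (PySem.List.enumerate ps s).find? (fun p => p.2 == c) =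
      (pvPosOf ps c).map (fun (k : Nat) => (s + (k : Int), c)) := by
  induction ps generalizing s with
  | nil => simp [PySem.List.enumerate_nil, pvPosOf]
  | cons x xs ih =>
    rw [PySem.List.enumerate_cons, List.find?_cons]
    unfold pvPosOf
    rw [List.findIdx?_cons]
    by_cases hx : (x == c) = true
    · have hxc : x = c := by simpa using hx
      simp [hxc]
    · have := ih (s + 1)
      unfold pvPosOf at this
      simp only [hx]
      simp only [Bool.false_eq_true, if_false, this]
      cases List.findIdx? (fun p => p == c) xs with
      | none => simp
      | some k =>
        simp [Prod.ext_iff]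
        omega

lemma pvMod_pred {k n : Nat} (h : k < n) :
    PySem.Int.mod ((k : Int) - 1) (n : Int) = ((pvSwapIdx n k : Nat) : Int) := by
  have hn : (0 : Int) < (n : Int) := by exact_mod_cast Nat.pos_of_ne_zero (by omega)
  rw [PySem.Int.mod_eq_emod_of_pos hn]
  unfold pvSwapIdx
  by_cases hk : k = 0
  · subst hk
    rw [if_pos rfl]
    rw [show ((0 : Nat) : Int) - 1 = ((n - 1 : Nat) : Int) - (n : Int) by omega,
      Int.sub_emod_right, Int.emod_eq_of_lt (by omega) (by omega)]
  · rw [if_neg hk, Int.emod_eq_of_lt (by omega) (by omega)]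
    omega

lemma pvSetD_pred {ps : List String} {k : Nat} (h : k < ps.length) (v : String) :
    PySem.List.pySetD ps ((k : Int) - 1) v = ps.set (pvSwapIdx ps.length k) v := by
  have hidx : PySem.List.pyIdx? ps.length ((k : Int) - 1) = some (pvSwapIdx ps.length k) := by
    unfold PySem.List.pyIdx? pvSwapIdx
    by_cases hk : k = 0
    · subst hk
      rw [if_neg (by omega), if_pos (by omega), if_pos rfl]
      congr 1
    · rw [if_pos (by omega), if_pos (by omega), if_neg hk]
      congr 1
      omega
  unfold PySem.List.pySetD PySem.List.pySet?
  rw [hidx]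
  rfl

lemma pvGetD_pred {ps : List String} {k : Nat} (h : k < ps.length) :
    PySem.List.pyGetD ps ((k : Int) - 1) "" = ps.getD (pvSwapIdx ps.length k) "" := by
  by_cases hk : k = 0
  · subst hk
    have hne : ps ≠ [] := List.ne_nil_of_length_pos (by omega)
    rw [show ((0 : Nat) : Int) - 1 = -1 by ring, PySem.List.pyGetD_neg_one ps "" hne]
    unfold pvSwapIdx
    rw [if_pos rfl, List.getLast_eq_getElem, List.getD_eq_getElem ps "" (by omega)]
  · rw [show ((k : Nat) : Int) - 1 = ((k - 1 : Nat) : Int) by omega, PySem.List.pyGetD_natCast]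
    unfold pvSwapIdx
    rw [if_neg hk]

lemma pvSwapIdx_lt {n k : Nat} (h : k < n) : pvSwapIdx n k < n := by
  unfold pvSwapIdx; split <;> omega

lemma pvStepA_eq (ps : List String) (c : String) :
    pvAInner ps c (PySem.List.enumerate ps 0) = pvStep ps c := by
  rw [pvAInner_eq_find, pvFind_enumerate]
  cases hp : pvPosOf ps c with
  | none => simp [pvStep, hp]
  | some k =>
    obtain ⟨hk, hck⟩ := pvPosOf_some hp
    simp only [Option.map_some, zero_add]
    have hback : PySem.List.pyGetD ps ((k : Nat) : Int) "" = c := by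
      rw [PySem.List.pyGetD_natCast, List.getD_eq_getElem ps "" hk, hck]
    rw [hback, pvSetD_pred hk c, pvGetD_pred hk, PySem.List.pySetD_natCast]
    unfold pvStep
    rw [hp]

lemma pvStep_length (ps : List String) (c : String) : (pvStep ps c).length = ps.length := by
  unfold pvStep; cases h : pvPosOf ps c <;> simp

lemma pvStep_nodup {ps : List String} (hnd : ps.Nodup) (c : String) : (pvStep ps c).Nodup := by
  cases hp : pvPosOf ps c with
  | none => simp only [pvStep, hp]; exact hnd
  | some k =>
    simp only [pvStep, hp]
    obtain ⟨hk, hck⟩ := pvPosOf_some hp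
    have hjlt : pvSwapIdx ps.length k < ps.length := pvSwapIdx_lt hk
    have hgd : ps.getD (pvSwapIdx ps.length k) "" = ps[pvSwapIdx ps.length k] :=
      List.getD_eq_getElem ps "" hjlt
    by_cases hjk : pvSwapIdx ps.length k = k
    · rw [hjk, List.set_set, List.getD_eq_getElem ps "" hk, List.set_getElem_self]
      exact hnd
    · rw [List.nodup_iff_injective_getElem]
      rintro ⟨a, ha⟩ ⟨b, hb⟩ hab
      have ha' : a < ps.length := by simpa using ha
      have hb' : b < ps.length := by simpa using hb
      have hmem : ∀ (m : Nat) (hm : m < ps.length),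
          ((ps.set (pvSwapIdx ps.length k) c).set k (ps.getD (pvSwapIdx ps.length k) ""))[m]'(by
            simpa using hm)
            = if k = m then ps.getD (pvSwapIdx ps.length k) "" else
                if pvSwapIdx ps.length k = m then c else ps[m] := by
        intro m hm
        rw [List.getElem_set, List.getElem_set]
      simp only at hab
      rw [hmem a ha', hmem b hb'] at hab
      rw [hgd, ← hck] at hab
      apply Fin.mk_eq_mk.mpr
      split_ifs at hab <;>
        first
          | omega
          | (have := hnd.getElem_inj_iff.mp hab; omega)

lemma pvBStep_correct {ps : List String} {pos : PySem.Dict String Int} (h : pvInv ps pos)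
    (c : String) : ∃ pos', pvBStep (ps.length : Int) (ps, pos) c = (pvStep ps c, pos') ∧
      pvInv (pvStep ps c) pos' := by
  obtain ⟨hnd, hget⟩ := h
  cases hp : pvPosOf ps c with
  | none =>
    have hc : pos.get? c = none := by rw [hget c, hp]; rfl
    refine ⟨pos, ?_, ?_⟩
    · simp only [pvBStep, hc, pvStep, hp]
    · simp only [pvStep, hp]
      exact ⟨hnd, hget⟩
  | some k =>
    obtain ⟨hk, hck⟩ := pvPosOf_some hp
    have hkc : pos.get? c = some ((k : Nat) : Int) := by rw [hget c, hp]; rfl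
    have hjlt : pvSwapIdx ps.length k < ps.length := pvSwapIdx_lt hk
    have hgd : ps.getD (pvSwapIdx ps.length k) "" = ps[pvSwapIdx ps.length k] :=
      List.getD_eq_getElem ps "" hjlt
    have hstep : pvStep ps c
        = (ps.set (pvSwapIdx ps.length k) c).set k ps[pvSwapIdx ps.length k] := by
      simp only [pvStep, hp]
      rw [hgd]
    have hnd2 : ((ps.set (pvSwapIdx ps.length k) c).set k ps[pvSwapIdx ps.length k]).Nodup :=
      hstep ▸ pvStep_nodup hnd c
    have h2 : ∀ (m : Nat) (hm : m < ps.length),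
        ((ps.set (pvSwapIdx ps.length k) c).set k ps[pvSwapIdx ps.length k])[m]'(by
          simpa using hm)
          = if k = m then ps[pvSwapIdx ps.length k] else
              if pvSwapIdx ps.length k = m then c else ps[m] := by
      intro m hm
      rw [List.getElem_set, List.getElem_set]
    refine ⟨(pos.insert c ((pvSwapIdx ps.length k : Nat) : Int)).insert
      (ps[pvSwapIdx ps.length k]'hjlt) ((k : Nat) : Int), ?_, ?_⟩
    · simp only [pvBStep, hkc, pvMod_pred hk, PySem.List.pyGetD_natCast,
        PySem.List.pySetD_natCast, hgd, hstep]
    · refine ⟨hstep ▸ hnd2, ?_⟩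
      intro s
      rw [hstep]
      by_cases hs1 : s = ps[pvSwapIdx ps.length k]
      · rw [hs1, PySem.Dict.get?_insert_self]
        have hq : pvPosOf ((ps.set (pvSwapIdx ps.length k) c).set k
            ps[pvSwapIdx ps.length k]) ps[pvSwapIdx ps.length k] = some k := by
          apply pvPosOf_of_getElem hnd2 (by simpa using hk)
          rw [h2 k hk, if_pos rfl]
        rw [hq]
        rfl
      · have hne1 : s ≠ ps[pvSwapIdx ps.length k] := hs1
        rw [PySem.Dict.get?_insert_of_ne _ _ hne1]
        by_cases hjk : pvSwapIdx ps.length k = k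
        · -- the called player is already at the swap target (single-player list): unchanged
          have hfc : ps[pvSwapIdx ps.length k] = c := by
            simp only [hjk]
            exact hck
          have hsc : s ≠ c := fun e => hne1 (e.trans hfc.symm)
          rw [PySem.Dict.get?_insert_of_ne _ _ hsc, hget s]
          have hps2 : (ps.set (pvSwapIdx ps.length k) c).set k ps[pvSwapIdx ps.length k] = ps := by
            simp only [hjk]
            rw [List.set_set]
            exact List.set_getElem_self hk
          rw [hps2]
        · have hfc : ps[pvSwapIdx ps.length k] ≠ c := fun e =>
            hjk (hnd.getElem_inj_iff.mp (e.trans hck.symm))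
          by_cases hsc : s = c
          · rw [hsc]
            rw [PySem.Dict.get?_insert_self pos c ((pvSwapIdx ps.length k : Nat) : Int)]
            have hq : pvPosOf ((ps.set (pvSwapIdx ps.length k) c).set k
                ps[pvSwapIdx ps.length k]) c = some (pvSwapIdx ps.length k) := by
              apply pvPosOf_of_getElem hnd2 (by simpa using hjlt)
              rw [h2 (pvSwapIdx ps.length k) hjlt, if_neg (fun e => hjk e.symm), if_pos rfl]
            rw [hq]
            rfl
          · rw [PySem.Dict.get?_insert_of_ne _ _ hsc, hget s]
            have hq : pvPosOf ((ps.set (pvSwapIdx ps.length k) c).set k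
                ps[pvSwapIdx ps.length k]) s = pvPosOf ps s := by
              cases hq : pvPosOf ps s with
              | none =>
                cases hq2 : pvPosOf ((ps.set (pvSwapIdx ps.length k) c).set k
                    ps[pvSwapIdx ps.length k]) s with
                | none => rfl
                | some m =>
                  obtain ⟨hm, hsm⟩ := pvPosOf_some hq2
                  have hm' : m < ps.length := by simpa using hm
                  rw [h2 m hm'] at hsm
                  split_ifs at hsm
                  · exact absurd hsm.symm hs1
                  · exact absurd hsm.symm hsc
                  · exact absurd (hsm ▸ List.getElem_mem hm') (pvPosOf_none.mp hq)
              | some m =>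
                obtain ⟨hm, hsm⟩ := pvPosOf_some hq
                have hmk : m ≠ k := fun e => hsc (by subst e; exact hsm.symm.trans hck)
                have hmj : m ≠ pvSwapIdx ps.length k := fun e => hs1 (by subst e; exact hsm.symm)
                apply pvPosOf_of_getElem hnd2 (by simpa using hm)
                rw [h2 m hm, if_neg (fun e => hmk e.symm), if_neg (fun e => hmj e.symm), hsm]
            rw [hq]

lemma pvPosOf_cons (x : String) (xs : List String) (s : String) :
    pvPosOf (x :: xs) s = if x == s then some 0 else (pvPosOf xs s).map (· + 1) := by
  unfold pvPosOf
  rw [List.findIdx?_cons]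

lemma pvBuild_get? (xs : List String) (s : String) (hnd : xs.Nodup) :
    ∀ (s0 : Int) (d : PySem.Dict String Int),
    ((PySem.List.enumerate xs s0).foldl (fun d (p : Int × String) => d.insert p.2 p.1) d).get? s
      = match pvPosOf xs s with
        | some k => some (s0 + k)
        | none => d.get? s := by
  induction xs with
  | nil => intro s0 d; simp [PySem.List.enumerate_nil, pvPosOf]
  | cons x xs ih =>
    intro s0 d
    rw [PySem.List.enumerate_cons, List.foldl_cons,
      ih (List.Nodup.of_cons hnd) (s0 + 1) (d.insert x s0), pvPosOf_cons]
    by_cases hx : (x == s) = true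
    · have hxs : x = s := by simpa using hx
      have hnm : pvPosOf xs s = none :=
        pvPosOf_none.mpr (hxs ▸ (List.nodup_cons.mp hnd).1)
      rw [hnm, if_pos hx, hxs]
      simp [PySem.Dict.get?_insert_self]
    · have hne : s ≠ x := fun h => hx (by simp [h])
      rw [if_neg hx]
      cases hp : pvPosOf xs s with
      | none => simp [PySem.Dict.get?_insert_of_ne d s0 hne]
      | some k =>
        simp only [Option.map_some]
        congr 1
        push_cast
        ring

lemma pvFold_main (callings : List String) : ∀ (ps : List String) (pos : PySem.Dict String Int)
    (n : Int), pvInv ps pos → n = (ps.length : Int) →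
    (callings.foldl (pvBStep n) (ps, pos)).1 =
      callings.foldl (fun ps c => pvAInner ps c (PySem.List.enumerate ps 0)) ps := by
  induction callings with
  | nil => intro ps pos n _ _; rfl
  | cons c rest ih =>
    intro ps pos n hinv hn
    obtain ⟨pos', heq, hinv'⟩ := pvBStep_correct hinv c
    rw [List.foldl_cons, List.foldl_cons, hn, heq, pvStepA_eq ps c]
    exact ih (pvStep ps c) pos' _ hinv' (by rw [pvStep_length])

-- ===== VERDICT (by name: the statement is the Claim_ definition above) =====
theorem solution_spec : Claim_equal_solution := by
  intro players callings _ hpre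
  unfold Spec_solution solution solution_alt
  refine (pvFold_main callings players _ _ ⟨hpre, ?_⟩ rfl).symm
  intro s
  rw [pvBuild_get? players s hpre 0 PySem.Dict.empty]
  cases h : pvPosOf players s <;> simp [PySem.Dict.get?_empty]
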